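-- pv_equiv track=rewrite | github.com/almudenamcastro/number_beauty | lib/utils.py | sprop_consecutive_repeat_max
-- ===== SOURCE A (Python) =====
-- def sprop_consecutive_repeat_max(n):
--     '''repeat_consec_max'''
--     pattern = [1]
--
--     for i in range(1, len(n)):
--         if n[i] == n[i - 1]:
--             pattern[-1] += 1
--         else:
--             pattern.append(1)
--
--     return max(pattern)
-- ===== SOURCE B (Python) =====
-- def sprop_consecutive_repeat_max(n):
--     '''repeat_consec_max: binary search on the answer k, feasibility tested by
--     substring containment (some character repeated k times occurs in n)'''
--     lo, hi = 1, len(n)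
--     while lo < hi:
--         mid = (lo + hi + 1) // 2
--         if any(c * mid in n for c in set(n)):
--             lo = mid
--         else:
--             hi = mid - 1
--     return lo
-- ===== Notes on version B (the rewrite author's own statement) =====
-- stated objective: alternative
-- what changed: replaces the left-to-right scan that accumulates a run-length list and takes its max with a binary search on the answer k, each candidate tested by substring containment (does some character repeated k times occur in n).
import Mathlib
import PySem

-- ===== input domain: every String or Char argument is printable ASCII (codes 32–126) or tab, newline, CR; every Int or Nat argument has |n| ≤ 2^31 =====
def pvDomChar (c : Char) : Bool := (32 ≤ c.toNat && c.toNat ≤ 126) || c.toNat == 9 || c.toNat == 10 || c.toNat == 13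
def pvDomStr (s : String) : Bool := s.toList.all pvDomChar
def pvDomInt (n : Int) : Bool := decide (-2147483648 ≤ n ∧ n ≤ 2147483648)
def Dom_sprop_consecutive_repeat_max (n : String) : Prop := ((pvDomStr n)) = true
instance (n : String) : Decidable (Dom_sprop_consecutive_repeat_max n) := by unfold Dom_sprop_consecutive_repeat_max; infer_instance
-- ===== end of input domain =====

-- B replaces A's left-to-right scan that accumulates a run-length list with a binary search
-- on the answer k, testing feasibility by substring containment (c*k in n); objective: alternative.

-- ===== PORT A =====
-- the loop indices i ∈ [1, len n) are always in range and pattern is never empty,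
-- so the pyGetD/pySetD defaults and the final .getD 0 are never used (Python's max never raises here)
def sprop_consecutive_repeat_max (n : String) : Int :=
  let s := n.toList
  let pattern :=
    (PySem.List.pyRange 1 (PySem.List.len s) 1).foldl
      (fun pattern i =>
        if PySem.List.pyGetD s i ' ' == PySem.List.pyGetD s (i - 1) ' ' then
          PySem.List.pySetD pattern (-1) (PySem.List.pyGetD pattern (-1) 0 + 1)
        else
          pattern ++ [1])
      [1]
  (PySem.List.max? pattern (fun x => x)).getD 0

-- ===== PORT B =====
-- any(c * mid in n for c in set(n)): is some character repeated mid times a substring of n?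
def pvHasRun (s : List Char) (k : Int) : Bool :=
  (PySem.Set.ofList s).any (fun c => PySem.Chars.isIn (List.replicate k.toNat c) s)

-- the while loop: binary search for the largest feasible k in [lo, hi]
def pvSearch (s : List Char) (lo hi : Int) : Int :=
  if lo < hi then
    let mid := PySem.Int.floordiv (lo + hi + 1) 2
    if pvHasRun s mid then pvSearch s mid hi else pvSearch s lo (mid - 1)
  else lo
termination_by (hi - lo).toNat
decreasing_by
  all_goals
    simp only [PySem.Int.floordiv_eq_ediv_of_pos (show (0:Int) < 2 by omega)] at *
  all_goals omega

def sprop_consecutive_repeat_max_alt (n : String) : Int :=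
  pvSearch n.toList 1 (PySem.List.len n.toList)

-- ===== PRECONDITION & SPEC =====
def Spec_sprop_consecutive_repeat_max (n : String) (out : Int) : Prop := out = sprop_consecutive_repeat_max_alt n
instance (n : String) (out : Int) : Decidable (Spec_sprop_consecutive_repeat_max n out) := by unfold Spec_sprop_consecutive_repeat_max; infer_instance

-- ===== CLAIM (what is proved, stated in full; the proofs are below) =====
def Claim_equal_sprop_consecutive_repeat_max : Prop := ∀ (n : String), Dom_sprop_consecutive_repeat_max n → Spec_sprop_consecutive_repeat_max n (sprop_consecutive_repeat_max n)

-- ===== LEMMAS AND PROOFS =====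

-- the run-length list of s (groupby lengths), as a proof-side yardstick for both ports:
-- pvGo c k cs = run lengths of (c repeated k times) ++ cs, the current run being k c's
def pvGo (c : Char) (k : Int) : List Char → List Int
  | [] => [k]
  | d :: ds => if d == c then pvGo c (k + 1) ds else k :: pvGo d 1 ds

def pvGroupLens : List Char → List Int
  | [] => []
  | c :: cs => pvGo c 1 cs

-- ---- A's fold equals the run-length yardstick ----

-- A's loop, restated structurally over the tail of the string
def pvLoop (prev : Char) (pat : List Int) : List Char → List Int
  | [] => pat
  | d :: ds =>
      pvLoop d
        (if d == prev then PySem.List.pySetD pat (-1) (PySem.List.pyGetD pat (-1) 0 + 1)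
         else pat ++ [1]) ds

-- pattern[-1] = v on a pattern known to end in k
theorem pvSetD_neg_one_append_singleton (pre : List Int) (k v : Int) :
    PySem.List.pySetD (pre ++ [k]) (-1) v = pre ++ [v] := by
  simp [PySem.List.pySetD, PySem.List.pySet?, PySem.List.pyIdx?]

theorem pvGo_ne_nil (c : Char) (k : Int) (cs : List Char) : pvGo c k cs ≠ [] := by
  induction cs generalizing c k with
  | nil => simp [pvGo]
  | cons d ds ih => simp only [pvGo]; split <;> simp [ih]

-- the structural loop with pattern pre ++ [k] computes pre ++ the run lengths
theorem pvLoop_eq_go (cs : List Char) (prev : Char) (pre : List Int) (k : Int) :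
    pvLoop prev (pre ++ [k]) cs = pre ++ pvGo prev k cs := by
  induction cs generalizing prev pre k with
  | nil => simp [pvLoop, pvGo]
  | cons d ds ih =>
    simp only [pvLoop, pvGo]
    by_cases h : d == prev
    · simp only [h, if_pos, pvSetD_neg_one_append_singleton,
        PySem.List.pyGetD_neg_one_append_singleton]
      have hd : d = prev := beq_iff_eq.mp h
      subst hd
      exact ih d pre (k + 1)
    · simp only [h, if_neg, Bool.false_eq_true, not_false_iff]
      rw [ih d (pre ++ [k]) 1]
      simp

-- A's index fold over pre ++ prev :: cs, from position pre.length + 1 on, is pvLoop prev · cs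
theorem pvFold_eq_loop (cs : List Char) (prev : Char) (pre : List Char) (pat : List Int) :
    (PySem.List.pyRange ((pre.length : Int) + 1) (PySem.List.len (pre ++ prev :: cs)) 1).foldl
      (fun pattern i =>
        if PySem.List.pyGetD (pre ++ prev :: cs) i ' ' ==
            PySem.List.pyGetD (pre ++ prev :: cs) (i - 1) ' ' then
          PySem.List.pySetD pattern (-1) (PySem.List.pyGetD pattern (-1) 0 + 1)
        else
          pattern ++ [1])
      pat = pvLoop prev pat cs := by
  induction cs generalizing prev pre pat with
  | nil =>
    rw [PySem.List.pyRange_one_eq_nil (by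
      simp only [PySem.List.len_eq, List.length_append, List.length_cons, List.length_nil]
      omega)]
    simp [pvLoop]
  | cons d ds ih =>
    rw [PySem.List.pyRange_one_cons (by
      simp only [PySem.List.len_eq, List.length_append, List.length_cons]
      push_cast
      omega)]
    simp only [List.foldl_cons]
    have h1 : PySem.List.pyGetD (pre ++ prev :: d :: ds) ((pre.length : Int) + 1) ' ' = d := by
      have : ((pre.length : Int) + 1) = (((pre.length + 1 : Nat)) : Int) := by omega
      rw [this, PySem.List.pyGetD_natCast]
      simp [List.getD]
    have h2 : PySem.List.pyGetD (pre ++ prev :: d :: ds) ((pre.length : Int) + 1 - 1) ' ' = prev := by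
      have : ((pre.length : Int) + 1 - 1) = ((pre.length : Nat) : Int) := by omega
      rw [this, PySem.List.pyGetD_natCast]
      simp [List.getD]
    rw [h1, h2]
    have key := ih d (pre ++ [prev])
      (if (d == prev) = true then PySem.List.pySetD pat (-1) (PySem.List.pyGetD pat (-1) 0 + 1)
       else pat ++ [1])
    simp only [List.append_assoc, List.cons_append, List.nil_append, List.length_append,
      List.length_cons, List.length_nil, Nat.zero_add] at key ⊢
    have hc : ((pre.length : Int) + 1 + 1) = (((pre.length + 1 : Nat) : Int) + 1) := by omega
    rw [hc, key]
    simp [pvLoop]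

theorem pvA_eq_maxD (n : String) :
    sprop_consecutive_repeat_max n
      = PySem.List.maxD (pvGroupLens n.toList) (fun x => x) 1 := by
  unfold sprop_consecutive_repeat_max
  cases h : n.toList with
  | nil => simp [pvGroupLens, PySem.List.maxD]; decide
  | cons c cs =>
    simp only []
    have hf := pvFold_eq_loop cs c [] [1]
    simp only [List.length_nil, Nat.cast_zero, List.nil_append, zero_add] at hf
    have hg := pvLoop_eq_go cs c [] 1
    simp only [List.nil_append] at hg
    rw [hg] at hf
    refine Eq.trans (congrArg (fun l => (PySem.List.max? l (fun x => x)).getD 0) hf) ?_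
    simp only [pvGroupLens, PySem.List.maxD]
    obtain ⟨m, hm⟩ : ∃ m, PySem.List.max? (pvGo c 1 cs) (fun x => x) = some m := by
      rcases Option.eq_none_or_eq_some (PySem.List.max? (pvGo c 1 cs) (fun x => x)) with h0 | h0
      · exact absurd ((PySem.List.max?_eq_none_iff _ _).mp h0) (pvGo_ne_nil c 1 cs)
      · exact h0
    rw [hm]
    rfl

-- ---- run lengths vs constant substrings ----

theorem pvGo_pos (c : Char) (k : Int) (cs : List Char) (hk : 1 ≤ k) :
    ∀ r ∈ pvGo c k cs, 1 ≤ r := by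
  induction cs generalizing c k with
  | nil => intro r hr; simp [pvGo] at hr; omega
  | cons d ds ih =>
    intro r hr
    simp only [pvGo] at hr
    by_cases h : d == c
    · rw [if_pos h] at hr; exact ih c (k + 1) (by omega) r hr
    · rw [if_neg h] at hr
      rcases List.mem_cons.mp hr with h1 | h1
      · omega
      · exact ih d 1 (by omega) r h1

-- every run length is realised as a constant infix
theorem pvGo_run_infix (cs : List Char) (c : Char) (k : Int) (hk : 1 ≤ k) :
    ∀ r ∈ pvGo c k cs, ∃ d, List.replicate r.toNat d <:+: (List.replicate k.toNat c ++ cs) := by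
  induction cs generalizing c k with
  | nil =>
    intro r hr; simp [pvGo] at hr; subst hr
    exact ⟨c, by simp⟩
  | cons e ds ih =>
    intro r hr
    simp only [pvGo] at hr
    by_cases h : e == c
    · rw [if_pos h] at hr
      have he : e = c := beq_iff_eq.mp h
      obtain ⟨d, hd⟩ := ih c (k + 1) (by omega) r hr
      refine ⟨d, ?_⟩
      have : List.replicate (k + 1).toNat c ++ ds = List.replicate k.toNat c ++ e :: ds := by
        subst he
        have h1 : (k + 1).toNat = k.toNat + 1 := by omega
        rw [h1, List.replicate_succ', List.append_assoc]
        simp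
      rwa [this] at hd
    · rw [if_neg h] at hr
      rcases List.mem_cons.mp hr with h1 | h1
      · subst h1
        exact ⟨c, ⟨[], e :: ds, by simp⟩⟩
      · obtain ⟨d, hd⟩ := ih e 1 (by omega) r h1
        refine ⟨d, hd.trans ?_⟩
        have h2 : List.replicate (1 : Int).toNat e ++ ds = e :: ds := by simp
        rw [h2]
        exact ⟨List.replicate k.toNat c, [], by simp⟩

-- a replicate-prefix of an all-c block followed by y ≠ c fits in the block
theorem pvPrefix_all_c (m : Nat) (xs : List Char) (c y : Char) (ys : List Char)
    (hall : ∀ a ∈ xs, a = c) (hy : y ≠ c)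
    (h : List.replicate m c <+: xs ++ y :: ys) : m ≤ xs.length := by
  induction m generalizing xs with
  | zero => omega
  | succ m ih =>
    cases xs with
    | nil =>
      exfalso
      rw [List.replicate_succ] at h
      obtain ⟨t, ht⟩ := h
      simp at ht
      exact hy ht.1.symm
    | cons a xs' =>
      rw [List.replicate_succ] at h
      obtain ⟨t, ht⟩ := h
      simp only [List.cons_append, List.cons.injEq] at ht
      have h2 : List.replicate m c <+: xs' ++ y :: ys := ⟨t, ht.2⟩
      have := ih xs' (fun a ha => hall a (List.mem_cons_of_mem _ ha)) h2
      simp; omega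

-- a constant infix of (all-c block) ++ y :: ys with y ≠ c lies in one of the parts
theorem pvStraddle (xs : List Char) (c y : Char) (ys : List Char) (m : Nat) (d : Char)
    (hall : ∀ a ∈ xs, a = c) (hy : y ≠ c) (hm : 1 ≤ m)
    (h : List.replicate m d <:+: xs ++ y :: ys) :
    List.replicate m d <:+: xs ∨ List.replicate m d <:+: y :: ys := by
  induction xs with
  | nil => exact Or.inr h
  | cons a xs' ih =>
    have ha : a = c := hall a List.mem_cons_self
    rcases List.infix_cons_iff.mp h with hpre | hinf
    · -- replicate m d is a prefix of a :: xs' ++ y :: ys, so d = a = c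
      have hallc : ∀ b ∈ a :: xs', b = c := by
        intro b hb; rcases List.mem_cons.mp hb with h1 | h1
        · rw [h1, ha]
        · exact hall b (List.mem_cons_of_mem _ h1)
      have hd : d = c := by
        obtain ⟨t, ht⟩ := hpre
        cases m with
        | zero => omega
        | succ m' =>
          rw [List.replicate_succ] at ht
          simp only [List.cons_append, List.cons.injEq] at ht
          exact ht.1.trans ha
      rw [hd] at hpre ⊢
      have hlen : m ≤ (a :: xs').length :=
        pvPrefix_all_c m (a :: xs') c y ys hallc hy (by simpa using hpre)
      left
      have hx : (a :: xs') = List.replicate (a :: xs').length c :=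
        List.eq_replicate_of_mem hallc
      rw [hx]
      have : List.replicate (a :: xs').length c
          = List.replicate m c ++ List.replicate ((a :: xs').length - m) c := by
        rw [← List.replicate_add]; congr 1; omega
      rw [this]
      exact ⟨[], List.replicate ((a :: xs').length - m) c, by simp⟩
    · rcases ih (fun b hb => hall b (List.mem_cons_of_mem _ hb)) hinf with h1 | h1
      · exact Or.inl (h1.trans ⟨[a], [], by simp⟩)
      · exact Or.inr h1

-- every constant infix is bounded by some run length
theorem pvInfix_le_run (cs : List Char) (c : Char) (k : Int) (hk : 1 ≤ k) (m : Nat) (d : Char)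
    (h : List.replicate m d <:+: (List.replicate k.toNat c ++ cs)) :
    ∃ r ∈ pvGo c k cs, (m : Int) ≤ r := by
  induction cs generalizing c k with
  | nil =>
    refine ⟨k, by simp [pvGo], ?_⟩
    have := h.length_le
    simp at this
    omega
  | cons e ds ih =>
    simp only [pvGo]
    by_cases he : e == c
    · rw [if_pos he]
      have hec : e = c := beq_iff_eq.mp he
      apply ih c (k + 1) (by omega)
      have : List.replicate (k + 1).toNat c ++ ds = List.replicate k.toNat c ++ e :: ds := by
        subst hec
        have h1 : (k + 1).toNat = k.toNat + 1 := by omega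
        rw [h1, List.replicate_succ', List.append_assoc]
        simp
      rwa [this]
    · rw [if_neg he]
      have hec : e ≠ c := fun hh => he (beq_iff_eq.mpr hh)
      by_cases hm : 1 ≤ m
      · rcases pvStraddle (List.replicate k.toNat c) c e ds m d
            (fun a ha => List.eq_of_mem_replicate ha) hec hm h with h1 | h1
        · refine ⟨k, List.mem_cons_self, ?_⟩
          have := h1.length_le
          simp at this
          omega
        · obtain ⟨r, hr, hle⟩ := ih e 1 (by omega) (by simpa using h1)
          exact ⟨r, List.mem_cons_of_mem _ hr, hle⟩
      · refine ⟨k, List.mem_cons_self, by omega⟩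

-- ---- the feasibility test characterised by the maximal run length ----

theorem pvMaxD_spec (c : Char) (cs : List Char) :
    (PySem.List.maxD (pvGo c 1 cs) (fun x => x) 1) ∈ pvGo c 1 cs ∧
    ∀ r ∈ pvGo c 1 cs, r ≤ PySem.List.maxD (pvGo c 1 cs) (fun x => x) 1 := by
  obtain ⟨m, hm⟩ : ∃ m, PySem.List.max? (pvGo c 1 cs) (fun x => x) = some m := by
    rcases Option.eq_none_or_eq_some (PySem.List.max? (pvGo c 1 cs) (fun x => x)) with h0 | h0
    · exact absurd ((PySem.List.max?_eq_none_iff _ _).mp h0) (pvGo_ne_nil c 1 cs)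
    · exact h0
  have hd : PySem.List.maxD (pvGo c 1 cs) (fun x => x) 1 = m := by
    simp [PySem.List.maxD, hm]
  rw [hd]
  exact ⟨PySem.List.max?_mem hm, fun r hr => PySem.List.max?_isMax hm r hr⟩

theorem pvHasRun_iff (c : Char) (cs : List Char) (k : Int) (hk : 1 ≤ k) :
    pvHasRun (c :: cs) k = true ↔ k ≤ PySem.List.maxD (pvGo c 1 cs) (fun x => x) 1 := by
  obtain ⟨hmem, hmax⟩ := pvMaxD_spec c cs
  set M := PySem.List.maxD (pvGo c 1 cs) (fun x => x) 1 with hM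
  have hM1 : 1 ≤ M := pvGo_pos c 1 cs (by omega) M hmem
  constructor
  · intro h
    obtain ⟨e, _, hin⟩ := List.any_eq_true.mp h
    have hinf : List.replicate k.toNat e <:+: (c :: cs) :=
      (PySem.Chars.isIn_iff_infix _ _).mp hin
    have : List.replicate (1 : Int).toNat c ++ cs = c :: cs := by simp
    rw [← this] at hinf
    obtain ⟨r, hr, hle⟩ := pvInfix_le_run cs c 1 (by omega) k.toNat e hinf
    have := hmax r hr
    omega
  · intro h
    obtain ⟨d, hd⟩ := pvGo_run_infix cs c 1 (by omega) M hmem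
    simp only [show ((1 : Int)).toNat = 1 from rfl, List.replicate_one, List.singleton_append] at hd
    have hpre : List.replicate k.toNat d <+: List.replicate M.toNat d := by
      refine ⟨List.replicate (M.toNat - k.toNat) d, ?_⟩
      rw [← List.replicate_add]; congr 1; omega
    have hinf : List.replicate k.toNat d <:+: (c :: cs) := hpre.isInfix.trans hd
    have hdmem : d ∈ c :: cs := by
      have : d ∈ List.replicate k.toNat d := by
        exact List.mem_replicate.mpr ⟨by omega, rfl⟩
      exact hinf.subset this
    apply List.any_eq_true.mpr
    exact ⟨d, (PySem.Set.mem_ofList _ _).mpr hdmem, (PySem.Chars.isIn_iff_infix _ _).mpr hinf⟩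

-- ---- the binary search finds the maximal feasible value ----

theorem pvSearch_eq (s : List Char) (M : Int)
    (hchar : ∀ k, 2 ≤ k → (pvHasRun s k = true ↔ k ≤ M)) :
    ∀ (N : Nat) (lo hi : Int), (hi - lo).toNat ≤ N → 1 ≤ lo → lo ≤ M → M ≤ hi →
      pvSearch s lo hi = M := by
  intro N
  induction N with
  | zero =>
    intro lo hi hN h1 h2 h3
    rw [pvSearch, if_neg (by omega)]
    omega
  | succ N ih =>
    intro lo hi hN h1 h2 h3
    rw [pvSearch]
    by_cases hlt : lo < hi
    · rw [if_pos hlt]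
      simp only [PySem.Int.floordiv_eq_ediv_of_pos (show (0:Int) < 2 by omega)]
      set mid := (lo + hi + 1) / 2 with hmid
      have hb : lo < mid ∧ mid ≤ hi ∧ 2 ≤ mid := by omega
      by_cases hr : pvHasRun s mid = true
      · rw [if_pos hr]
        have hmM : mid ≤ M := (hchar mid hb.2.2).mp hr
        exact ih mid hi (by omega) (by omega) hmM h3
      · rw [if_neg hr]
        have hmM : ¬ mid ≤ M := fun hh => hr ((hchar mid hb.2.2).mpr hh)
        exact ih lo (mid - 1) (by omega) h1 h2 (by omega)
    · rw [if_neg hlt]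
      omega

theorem pvB_eq_maxD (n : String) :
    sprop_consecutive_repeat_max_alt n
      = PySem.List.maxD (pvGroupLens n.toList) (fun x => x) 1 := by
  unfold sprop_consecutive_repeat_max_alt
  cases h : n.toList with
  | nil =>
    rw [pvSearch, if_neg (by simp [PySem.List.len_eq])]
    simp [pvGroupLens, PySem.List.maxD]
    decide
  | cons c cs =>
    obtain ⟨hmem, hmax⟩ := pvMaxD_spec c cs
    set M := PySem.List.maxD (pvGo c 1 cs) (fun x => x) 1 with hM
    have hM1 : 1 ≤ M := pvGo_pos c 1 cs (by omega) M hmem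
    have hMlen : M ≤ PySem.List.len (c :: cs) := by
      obtain ⟨d, hd⟩ := pvGo_run_infix cs c 1 (by omega) M hmem
      have hlen := hd.length_le
      simp [PySem.List.len_eq] at hlen ⊢
      omega
    simp only [pvGroupLens, ← hM]
    exact pvSearch_eq (c :: cs) M (fun k hk => pvHasRun_iff c cs k (by omega))
      (PySem.List.len (c :: cs) - 1).toNat 1 (PySem.List.len (c :: cs)) (by omega) (by omega)
      hM1 hMlen

-- ===== VERDICT (by name: the statement is the Claim_ definition above) =====
theorem sprop_consecutive_repeat_max_spec : Claim_equal_sprop_consecutive_repeat_max := by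
  intro n _
  unfold Spec_sprop_consecutive_repeat_max
  rw [pvA_eq_maxD, pvB_eq_maxD]
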